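-- pv_equiv track=rewrite | github.com/21B030720/Web-Dev | lab_7/django1/3/Logic-2/lone_sum.py | lone_sum
-- ===== SOURCE A (Python) =====
-- def lone_sum(a, b, c):
--   k = 0
--   d = []
--   l = [a, b, c]
--   for i in l:
--     if(l.count(i) > 1):
--       d.append(i)
--   for i in l:
--     if(i not in d):
--       k += i
--   return k
-- ===== SOURCE B (Python) =====
-- def lone_sum(a, b, c):
--     if a == b == c:
--         return 0
--     if a == b:
--         return c
--     if a == c:
--         return b
--     if b == c:
--         return a
--     return a + b + c
-- ===== Notes on version B (the rewrite author's own statement) =====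
-- stated objective: idiomatic
-- what changed: Replaced the two list passes (count + membership) with the classic closed-form pairwise-equality branch cascade; no list is built or scanned.
import Mathlib
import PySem

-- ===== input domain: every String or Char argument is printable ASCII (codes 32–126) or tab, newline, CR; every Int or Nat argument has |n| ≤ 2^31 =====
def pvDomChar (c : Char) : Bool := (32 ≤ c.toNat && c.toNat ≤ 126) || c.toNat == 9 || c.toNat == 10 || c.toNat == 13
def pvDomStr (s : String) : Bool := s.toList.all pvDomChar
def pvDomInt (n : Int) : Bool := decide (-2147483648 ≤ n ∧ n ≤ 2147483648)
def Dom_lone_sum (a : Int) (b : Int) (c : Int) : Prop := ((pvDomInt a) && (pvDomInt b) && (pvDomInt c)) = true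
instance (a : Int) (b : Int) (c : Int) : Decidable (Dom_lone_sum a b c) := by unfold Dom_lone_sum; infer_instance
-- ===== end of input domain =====

-- B replaces A's two list passes with the closed-form pairwise-equality branch cascade (idiomatic).


-- ===== PORT A =====
-- literal port of A: scan l collecting duplicated values into d, then sum the values not in d
def lone_sum (a : Int) (b : Int) (c : Int) : Int :=
  let l : List Int := [a, b, c]
  let d : List Int :=
    l.foldl (fun d i => if PySem.List.count l i > 1 then d ++ [i] else d) []
  l.foldl (fun k i => if i ∉ d then k + i else k) 0

-- ===== PORT B =====
-- B: closed-form pairwise-equality branch cascade, no lists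
def lone_sum_alt (a : Int) (b : Int) (c : Int) : Int :=
  if a = b ∧ b = c then 0
  else if a = b then c
  else if a = c then b
  else if b = c then a
  else a + b + c

-- ===== PRECONDITION & SPEC =====
def Spec_lone_sum (a : Int) (b : Int) (c : Int) (out : Int) : Prop := out = lone_sum_alt a b c
instance (a : Int) (b : Int) (c : Int) (out : Int) : Decidable (Spec_lone_sum a b c out) := by unfold Spec_lone_sum; infer_instance

-- ===== CLAIM (what is proved, stated in full; the proofs are below) =====
def Claim_equal_lone_sum : Prop := ∀ (a : Int) (b : Int) (c : Int), Dom_lone_sum a b c → Spec_lone_sum a b c (lone_sum a b c)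

-- ===== LEMMAS AND PROOFS =====

-- ===== VERDICT (by name: the statement is the Claim_ definition above) =====
theorem lone_sum_spec : Claim_equal_lone_sum := by
  intro a b c _
  unfold Spec_lone_sum lone_sum lone_sum_alt
  by_cases hab : a = b <;> by_cases hac : a = c <;> by_cases hbc : b = c <;>
    subst_vars <;>
    simp_all [PySem.List.count, List.foldl] <;> omega
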